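-- pv_equiv track=rewrite | github.com/femiaiyeku/Algorithm_Exprt_Project | Arrays/Longest_Peak/solution_2.py | getPeakLength
-- ===== SOURCE A (Python) =====
-- def getPeakLength(i, array, left = False):
--     try:
--         if not left and array[i] > array[i + 1]:
--             return 1 + getPeakLength(i + 1, array, left = True) + getPeakLength(i +1, array)
--         elif left and array[i] > array[i - 1]:
--             return 1 + getPeakLength(i - 1, array, left = True) + getPeakLength(i -1, array)
--         else:
--             return 1
--     except IndexError:
--         return 1
-- ===== SOURCE B (Python) =====
-- def getPeakLength(i, array, left=False):
--     # Iterative re-implementation: walk the strictly-descending run in the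
--     # chosen direction, adding 2 per step, instead of A's branching recursion.
--     total = 1
--     try:
--         if left:
--             while array[i] > array[i - 1]:
--                 total += 2
--                 i -= 1
--         else:
--             while array[i] > array[i + 1]:
--                 total += 2
--                 i += 1
--     except IndexError:
--         pass
--     return total
-- ===== Notes on version B (the rewrite author's own statement) =====
-- stated objective: simpler
-- what changed: Replaced A's three-way branching recursion (each step spawns a left-mode call that always returns 1 plus a same-direction recursive call) by a single iterative while loop that walks the descending run once, adding 2 per step.
import Mathlib
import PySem

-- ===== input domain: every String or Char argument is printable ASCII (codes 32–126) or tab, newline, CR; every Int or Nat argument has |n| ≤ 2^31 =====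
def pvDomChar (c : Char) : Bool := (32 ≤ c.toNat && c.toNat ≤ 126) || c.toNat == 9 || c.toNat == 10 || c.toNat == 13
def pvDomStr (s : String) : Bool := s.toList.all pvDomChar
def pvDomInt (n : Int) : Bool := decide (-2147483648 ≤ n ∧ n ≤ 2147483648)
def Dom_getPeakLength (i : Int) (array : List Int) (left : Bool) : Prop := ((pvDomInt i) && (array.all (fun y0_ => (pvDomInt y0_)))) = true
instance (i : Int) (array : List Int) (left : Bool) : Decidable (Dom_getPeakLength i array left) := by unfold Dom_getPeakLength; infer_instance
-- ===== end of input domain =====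

-- B replaces A's branching recursion by a single iterative walk along the run (objective: simpler).

-- in-range fact needed by the termination measures of B's loops
theorem pvGetSomeInRange {α : Type} (xs : List α) (i : Int) (a : α)
    (h : PySem.List.pyGet? xs i = some a) : -(xs.length : Int) ≤ i ∧ i < xs.length := by
  by_contra hc
  have hn : PySem.List.pyGet? xs i = none := by
    rw [PySem.List.pyGet?_eq_none_iff]
    simp [PySem.Raise.InRange]
    omega
  simp [hn] at h

-- ===== PORT A =====
-- literal transliteration of A's recursion, made total with fuel ≥ maximal recursion depth
def getPeakLengthFuel (fuel : Nat) (i : Int) (array : List Int) (left : Bool) : Int :=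
  match fuel with
  | 0 => 1  -- never reached with the wrapper's fuel (proved below)
  | Nat.succ fuel =>
    match PySem.List.pyGet? array i with
    | none => 1  -- IndexError on array[i] -> return 1
    | some a =>
      if left = false then
        match PySem.List.pyGet? array (i + 1) with
        | none => 1
        | some b =>
          if a > b then
            1 + getPeakLengthFuel fuel (i + 1) array true + getPeakLengthFuel fuel (i + 1) array false
          else 1
      else
        match PySem.List.pyGet? array (i - 1) with
        | none => 1
        | some b =>
          if a > b then
            1 + getPeakLengthFuel fuel (i - 1) array true + getPeakLengthFuel fuel (i - 1) array false
          else 1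

def getPeakLength (i : Int) (array : List Int) (left : Bool) : Int :=
  getPeakLengthFuel (2 * array.length + 2) i array left

-- ===== PORT B =====
-- the rightward while loop of Source B
def pvLoopR (array : List Int) (i total : Int) : Int :=
  match h1 : PySem.List.pyGet? array i, h2 : PySem.List.pyGet? array (i + 1) with
  | some a, some b => if a > b then pvLoopR array (i + 1) (total + 2) else total
  | _, _ => total
termination_by ((array.length : Int) - i).toNat
decreasing_by
  have k1 := pvGetSomeInRange array i a h1
  have k2 := pvGetSomeInRange array (i + 1) b h2
  omega

-- the leftward while loop of Source B
def pvLoopL (array : List Int) (i total : Int) : Int :=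
  match h1 : PySem.List.pyGet? array i, h2 : PySem.List.pyGet? array (i - 1) with
  | some a, some b => if a > b then pvLoopL array (i - 1) (total + 2) else total
  | _, _ => total
termination_by (i + (array.length : Int) + 1).toNat
decreasing_by
  have k1 := pvGetSomeInRange array i a h1
  have k2 := pvGetSomeInRange array (i - 1) b h2
  omega

def getPeakLength_alt (i : Int) (array : List Int) (left : Bool) : Int :=
  if left then pvLoopL array i 1 else pvLoopR array i 1

-- ===== PRECONDITION & SPEC =====
def Spec_getPeakLength (i : Int) (array : List Int) (left : Bool) (out : Int) : Prop := out = getPeakLength_alt i array left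
instance (i : Int) (array : List Int) (left : Bool) (out : Int) : Decidable (Spec_getPeakLength i array left out) := by unfold Spec_getPeakLength; infer_instance

-- ===== CLAIM (what is proved, stated in full; the proofs are below) =====
def Claim_equal_getPeakLength : Prop := ∀ (i : Int) (array : List Int) (left : Bool), Dom_getPeakLength i array left → Spec_getPeakLength i array left (getPeakLength i array left)

-- ===== LEMMAS AND PROOFS =====

-- the spawned opposite-direction call of A always returns 1
theorem pvLeafL (array : List Int) (i : Int) (a b : Int)
    (hi : PySem.List.pyGet? array i = some a) (h1 : PySem.List.pyGet? array (i + 1) = some b)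
    (hab : a > b) : ∀ f, getPeakLengthFuel f (i + 1) array true = 1 := by
  intro f
  cases f with
  | zero => rfl
  | succ f =>
    have e : i + 1 - 1 = i := by ring
    simp only [getPeakLengthFuel, h1, e, hi]
    simp
    omega

theorem pvLeafR (array : List Int) (i : Int) (a b : Int)
    (hi : PySem.List.pyGet? array i = some a) (h1 : PySem.List.pyGet? array (i - 1) = some b)
    (hab : a > b) : ∀ f, getPeakLengthFuel f (i - 1) array false = 1 := by
  intro f
  cases f with
  | zero => rfl
  | succ f =>
    have e : i - 1 + 1 = i := by ring
    simp only [getPeakLengthFuel, h1, e, hi]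
    simp
    omega

theorem pvEqR (array : List Int) : ∀ (f : Nat) (i t : Int),
    -(array.length : Int) ≤ i → ((array.length : Int) - i).toNat ≤ f →
    getPeakLengthFuel f i array false + (t - 1) = pvLoopR array i t := by
  intro f
  induction f with
  | zero =>
    intro i t hlo hf
    have hn : PySem.List.pyGet? array i = none := by
      rw [PySem.List.pyGet?_eq_none_iff]
      simp [PySem.Raise.InRange]
      omega
    rw [pvLoopR.eq_def, hn]
    simp [getPeakLengthFuel]
  | succ f ih =>
    intro i t hlo hf
    rw [pvLoopR.eq_def]
    cases h1 : PySem.List.pyGet? array i with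
    | none => simp [getPeakLengthFuel, h1]
    | some a =>
      cases h2 : PySem.List.pyGet? array (i + 1) with
      | none => simp [getPeakLengthFuel, h1, h2]
      | some b =>
        by_cases hab : a > b
        · have hleaf := pvLeafL array i a b h1 h2 hab f
          have k2 := pvGetSomeInRange array (i + 1) b h2
          have ihr := ih (i + 1) (t + 2) (by omega) (by omega)
          have hstep : getPeakLengthFuel (f + 1) i array false
              = 2 + getPeakLengthFuel f (i + 1) array false := by
            simp only [getPeakLengthFuel, h1, h2, hleaf, if_pos hab]
            simp
          rw [hstep]
          simp only [hab, if_true]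
          linarith [ihr]
        · simp [getPeakLengthFuel, h1, h2, hab]

theorem pvEqL (array : List Int) : ∀ (f : Nat) (i t : Int),
    i ≤ (array.length : Int) → (i + (array.length : Int) + 1).toNat ≤ f →
    getPeakLengthFuel f i array true + (t - 1) = pvLoopL array i t := by
  intro f
  induction f with
  | zero =>
    intro i t hhi hf
    have hn : PySem.List.pyGet? array i = none := by
      rw [PySem.List.pyGet?_eq_none_iff]
      simp [PySem.Raise.InRange]
      omega
    rw [pvLoopL.eq_def, hn]
    simp [getPeakLengthFuel]
  | succ f ih =>
    intro i t hhi hf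
    rw [pvLoopL.eq_def]
    cases h1 : PySem.List.pyGet? array i with
    | none => simp [getPeakLengthFuel, h1]
    | some a =>
      cases h2 : PySem.List.pyGet? array (i - 1) with
      | none => simp [getPeakLengthFuel, h1, h2]
      | some b =>
        by_cases hab : a > b
        · have hleaf := pvLeafR array i a b h1 h2 hab f
          have k2 := pvGetSomeInRange array (i - 1) b h2
          have ihl := ih (i - 1) (t + 2) (by omega) (by omega)
          have hstep : getPeakLengthFuel (f + 1) i array true
              = 2 + getPeakLengthFuel f (i - 1) array true := by
            simp only [getPeakLengthFuel, h1, h2, hleaf, if_pos hab]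
            simp
            ring
          rw [hstep]
          simp only [hab, if_true]
          linarith [ihl]
        · simp [getPeakLengthFuel, h1, h2, hab]

-- ===== VERDICT (by name: the statement is the Claim_ definition above) =====
theorem getPeakLength_spec : Claim_equal_getPeakLength := by
  intro i array left _
  unfold Spec_getPeakLength getPeakLength getPeakLength_alt
  cases left with
  | false =>
    simp only [if_neg (show ¬ (false = true) by simp)]
    by_cases hlo : -(array.length : Int) ≤ i
    · have h := pvEqR array (2 * array.length + 2) i 1 hlo (by omega)
      simpa using h
    · have hn : PySem.List.pyGet? array i = none := by
        rw [PySem.List.pyGet?_eq_none_iff]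
        simp [PySem.Raise.InRange]
        omega
      rw [pvLoopR.eq_def, hn]
      simp [getPeakLengthFuel, hn]
  | true =>
    rw [if_pos rfl]
    by_cases hhi : i ≤ (array.length : Int)
    · have h := pvEqL array (2 * array.length + 2) i 1 hhi (by omega)
      simpa using h
    · have hn : PySem.List.pyGet? array i = none := by
        rw [PySem.List.pyGet?_eq_none_iff]
        simp [PySem.Raise.InRange]
        omega
      rw [pvLoopL.eq_def, hn]
      simp [getPeakLengthFuel, hn]
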